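-- pv_equiv track=rewrite | github.com/EmmaEmmEmm/ProgramPython | 程式設計作業-郭忠義/GPT/money.py | check_prizes
-- ===== SOURCE A (Python) =====
-- def check_prizes(invoice_number, prize_numbers):
--     special_prize, grand_prize, *first_prizes = prize_numbers
--     prize_levels = [
--         ("Special Prize", 10_000_000, special_prize),
--         ("Grand Prize", 2_000_000, grand_prize),
--         ("1st Prize", 200_000, first_prizes),
--         ("2nd Prize", 40_000, [num[-7:] for num in first_prizes]),
--         ("3rd Prize", 10_000, [num[-6:] for num in first_prizes]),
--         ("4th Prize", 4_000, [num[-5:] for num in first_prizes]),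
--         ("5th Prize", 1_000, [num[-4:] for num in first_prizes]),
--         ("6th Prize", 200, [num[-3:] for num in first_prizes]),
--     ]
--     for prize_name, prize_value, prize_number in prize_levels:
--         if isinstance(prize_number, list):
--             if any(invoice_number.endswith(num) for num in prize_number):
--                 return prize_name, prize_value
--         else:
--             if invoice_number == prize_number:
--                 return prize_name, prize_value
--     return None, 0
-- ===== SOURCE B (Python) =====
-- _TIERS = [
--     ("1st Prize", 200_000),
--     ("2nd Prize", 40_000),
--     ("3rd Prize", 10_000),
--     ("4th Prize", 4_000),
--     ("5th Prize", 1_000),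
--     ("6th Prize", 200),
-- ]
--
-- _SUFFIX_LENS = [None, 7, 6, 5, 4, 3]
--
--
-- def _tier_index(invoice_number, num):
--     """Smallest tier index whose suffix of num the invoice ends with; 6 if none."""
--     for k, length in enumerate(_SUFFIX_LENS):
--         tail = num if length is None else num[-length:]
--         if invoice_number.endswith(tail):
--             return k
--     return 6
--
--
-- def check_prizes(invoice_number, prize_numbers):
--     special_prize, grand_prize, *first_prizes = prize_numbers
--     if invoice_number == special_prize:
--         return ("Special Prize", 10_000_000)
--     if invoice_number == grand_prize:
--         return ("Grand Prize", 2_000_000)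
--     best = 6  # = len(_TIERS): no tier matched
--     for num in first_prizes:
--         best = min(best, _tier_index(invoice_number, num))
--     if best == 6:
--         return (None, 0)
--     return _TIERS[best]
-- ===== Notes on version B (the rewrite author's own statement) =====
-- stated objective: alternative
-- what changed: Instead of building eight prize-level lists up front and scanning them tier-by-tier with any(), B checks the two exact-match prizes directly and then makes one pass over the first-prize numbers, computing for each the smallest matching suffix-tier index and keeping the running minimum, mapping the final minimum to its (name, value) at the end.
import Mathlib
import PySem

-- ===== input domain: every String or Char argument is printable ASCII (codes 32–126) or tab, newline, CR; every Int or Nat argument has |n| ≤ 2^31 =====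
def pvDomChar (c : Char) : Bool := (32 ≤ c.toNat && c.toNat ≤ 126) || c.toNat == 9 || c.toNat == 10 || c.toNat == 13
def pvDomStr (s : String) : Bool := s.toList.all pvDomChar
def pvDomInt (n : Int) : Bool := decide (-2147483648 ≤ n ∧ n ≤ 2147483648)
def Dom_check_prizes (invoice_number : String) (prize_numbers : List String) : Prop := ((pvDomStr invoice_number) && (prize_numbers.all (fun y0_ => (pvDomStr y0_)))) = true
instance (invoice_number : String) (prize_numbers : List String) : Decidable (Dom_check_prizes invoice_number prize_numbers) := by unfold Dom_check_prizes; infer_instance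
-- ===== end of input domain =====

-- B replaces A's eight materialised prize-level lists scanned tier-by-tier with direct
-- equality checks plus a single pass over the first-prize numbers keeping the minimal
-- matching tier index (alternative decomposition, same asymptotic cost).


-- ===== PORT A =====
-- A's loop over prize_levels; the mixed str/list third component becomes a Sum.
def aLoop (inv : String) : List (String × Int × (String ⊕ List String)) → Option String × Int
  | [] => (none, 0)
  | (prize_name, prize_value, prize_number) :: rest =>
    match prize_number with
    | .inr nums =>
      if nums.any (fun num => PySem.Str.endswith inv num) then (some prize_name, prize_value)
      else aLoop inv rest
    | .inl num =>
      if inv == num then (some prize_name, prize_value)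
      else aLoop inv rest

def check_prizes (invoice_number : String) (prize_numbers : List String) : Option String × Int :=
  match prize_numbers with
  | special_prize :: grand_prize :: first_prizes =>
    aLoop invoice_number
      [ ("Special Prize", 10000000, .inl special_prize),
        ("Grand Prize", 2000000, .inl grand_prize),
        ("1st Prize", 200000, .inr first_prizes),
        ("2nd Prize", 40000, .inr (first_prizes.map (fun num => PySem.Str.slice num (some (-7)) none))),
        ("3rd Prize", 10000, .inr (first_prizes.map (fun num => PySem.Str.slice num (some (-6)) none))),
        ("4th Prize", 4000, .inr (first_prizes.map (fun num => PySem.Str.slice num (some (-5)) none))),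
        ("5th Prize", 1000, .inr (first_prizes.map (fun num => PySem.Str.slice num (some (-4)) none))),
        ("6th Prize", 200, .inr (first_prizes.map (fun num => PySem.Str.slice num (some (-3)) none))) ]
  | _ => (none, 0)  -- A raises ValueError (unpacking needs ≥ 2 elements); excluded by Pre_

-- ===== PORT B =====
def bTiers : List (String × Int) :=
  [ ("1st Prize", 200000), ("2nd Prize", 40000), ("3rd Prize", 10000),
    ("4th Prize", 4000), ("5th Prize", 1000), ("6th Prize", 200) ]

def bSuffixLens : List (Option Int) := [none, some 7, some 6, some 5, some 4, some 3]

-- _tier_index's enumerate loop over _SUFFIX_LENS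
def tierIndexGo (invoice_number num : String) (k : Nat) : List (Option Int) → Nat
  | [] => 6
  | length :: ls =>
    let tail := match length with
      | none => num
      | some l => PySem.Str.slice num (some (-l)) none
    if PySem.Str.endswith invoice_number tail then k
    else tierIndexGo invoice_number num (k + 1) ls

def tierIndex (invoice_number num : String) : Nat :=
  tierIndexGo invoice_number num 0 bSuffixLens

def check_prizes_alt (invoice_number : String) (prize_numbers : List String) : Option String × Int :=
  match prize_numbers with
  | [] => (none, 0)
  | special_prize :: rest =>
    match rest with
    | [] => (none, 0)
    | grand_prize :: first_prizes =>
      if invoice_number == special_prize then (some "Special Prize", 10000000)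
      else if invoice_number == grand_prize then (some "Grand Prize", 2000000)
      else
        let best := first_prizes.foldl (fun b num => min b (tierIndex invoice_number num)) 6
        if best == 6 then (none, 0)
        else
          match bTiers[best]? with
          | some (name, value) => (some name, value)
          | none => (none, 0)   -- unreachable: best < 6 = bTiers.length
-- ===== PRECONDITION & SPEC =====
-- Pre_ excludes only lists with fewer than two prize numbers, on which A's starred
-- unpacking raises ValueError (B raises identically in Python).
def Pre_check_prizes (invoice_number : String) (prize_numbers : List String) : Prop :=
  2 ≤ prize_numbers.length
instance (invoice_number : String) (prize_numbers : List String) : Decidable (Pre_check_prizes invoice_number prize_numbers) := by unfold Pre_check_prizes; infer_instance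

def pvWitness_check_prizes : String × List String := ("12345678", ["11111111", "22222222", "00345678"])

def Spec_check_prizes (invoice_number : String) (prize_numbers : List String) (out : Option String × Int) : Prop := out = check_prizes_alt invoice_number prize_numbers
instance (invoice_number : String) (prize_numbers : List String) (out : Option String × Int) : Decidable (Spec_check_prizes invoice_number prize_numbers out) := by unfold Spec_check_prizes; infer_instance

-- ===== CLAIM (what is proved, stated in full; the proofs are below) =====
def Claim_equal_check_prizes : Prop := ∀ (invoice_number : String) (prize_numbers : List String), Dom_check_prizes invoice_number prize_numbers → Pre_check_prizes invoice_number prize_numbers → Spec_check_prizes invoice_number prize_numbers (check_prizes invoice_number prize_numbers)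

-- ===== LEMMAS AND PROOFS =====

-- the suffix of num tested at tier level described by length
def tailOf (length : Option Int) (num : String) : String :=
  match length with
  | none => num
  | some l => PySem.Str.slice num (some (-l)) none

-- first tier index k.. whose suffix some element of rest matches, 6 if none
def chainGo (inv : String) (rest : List String) (k : Nat) : List (Option Int) → Nat
  | [] => 6
  | length :: ls =>
    if rest.any (fun num => PySem.Str.endswith inv (tailOf length num)) then k
    else chainGo inv rest (k + 1) ls

def chainN (inv : String) (rest : List String) : Nat :=
  chainGo inv rest 0 bSuffixLens

lemma tierIndexGo_eq (inv num : String) (k : Nat) (ls : List (Option Int)) :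
    tierIndexGo inv num k ls =
      (if ls = [] then 6
       else if PySem.Str.endswith inv (tailOf ls.head! num) then k
       else tierIndexGo inv num (k + 1) ls.tail) := by
  cases ls with
  | nil => rfl
  | cons L ls => cases L <;> simp [tierIndexGo, tailOf]

lemma le_tierIndexGo (inv num : String) (k : Nat) (ls : List (Option Int))
    (h : k + ls.length ≤ 6) : k ≤ tierIndexGo inv num k ls := by
  induction ls generalizing k with
  | nil => simp [tierIndexGo]; omega
  | cons L ls ih =>
    rw [tierIndexGo_eq]
    simp only [List.head!_cons, List.tail_cons, reduceCtorEq, if_false]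
    split
    · exact le_refl k
    · have := ih (k + 1) (by simp at h ⊢; omega)
      omega

lemma tierIndexGo_le (inv num : String) (k : Nat) (ls : List (Option Int))
    (h : k + ls.length ≤ 6) : tierIndexGo inv num k ls ≤ 6 := by
  induction ls generalizing k with
  | nil => simp [tierIndexGo]
  | cons L ls ih =>
    rw [tierIndexGo_eq]
    simp only [List.head!_cons, List.tail_cons, reduceCtorEq, if_false]
    split
    · simp at h; omega
    · exact ih (k + 1) (by simp at h ⊢; omega)

lemma le_chainGo (inv : String) (rest : List String) (k : Nat) (ls : List (Option Int))
    (h : k + ls.length ≤ 6) : k ≤ chainGo inv rest k ls := by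
  induction ls generalizing k with
  | nil => simp [chainGo]; omega
  | cons L ls ih =>
    simp only [chainGo]
    split
    · exact le_refl k
    · have := ih (k + 1) (by simp at h ⊢; omega)
      omega

lemma chainGo_le (inv : String) (rest : List String) (k : Nat) (ls : List (Option Int))
    (h : k + ls.length ≤ 6) : chainGo inv rest k ls ≤ 6 := by
  induction ls generalizing k with
  | nil => simp [chainGo]
  | cons L ls ih =>
    simp only [chainGo]
    split
    · simp at h; omega
    · exact ih (k + 1) (by simp at h ⊢; omega)

lemma tierIndex_le (inv num : String) : tierIndex inv num ≤ 6 :=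
  tierIndexGo_le inv num 0 bSuffixLens (by simp [bSuffixLens])

lemma chainN_le (inv : String) (rest : List String) : chainN inv rest ≤ 6 :=
  chainGo_le inv rest 0 bSuffixLens (by simp [bSuffixLens])

lemma chainGo_cons (inv n : String) (rest : List String) (k : Nat) (ls : List (Option Int))
    (h : k + ls.length ≤ 6) :
    chainGo inv (n :: rest) k ls = min (tierIndexGo inv n k ls) (chainGo inv rest k ls) := by
  induction ls generalizing k with
  | nil => simp [chainGo, tierIndexGo]
  | cons L ls ih =>
    have hlen : k + 1 + ls.length ≤ 6 := by simp at h; omega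
    rw [tierIndexGo_eq]
    simp only [chainGo, List.any_cons, List.head!_cons, List.tail_cons, reduceCtorEq, if_false,
      Bool.or_eq_true]
    by_cases hn : PySem.Str.endswith inv (tailOf L n) = true
    · have h1 := le_chainGo inv rest k (L :: ls) h
      simp only [chainGo] at h1
      rw [if_pos (Or.inl hn), if_pos hn]
      omega
    · have h1 := le_tierIndexGo inv n (k + 1) ls hlen
      rw [if_neg hn]
      by_cases hr : (rest.any fun num => PySem.Str.endswith inv (tailOf L num)) = true
      · rw [if_pos (Or.inr hr)]
        simp only [hr, if_true]
        omega
      · rw [if_neg (by tauto)]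
        simp only [hr, Bool.false_eq_true, if_false]
        exact ih (k + 1) hlen

lemma chainN_cons (inv n : String) (rest : List String) :
    chainN inv (n :: rest) = min (tierIndex inv n) (chainN inv rest) :=
  chainGo_cons inv n rest 0 bSuffixLens (by simp [bSuffixLens])

lemma fold_min (inv : String) (rest : List String) (b : Nat) (hb : b ≤ 6) :
    rest.foldl (fun b num => min b (tierIndex inv num)) b = min b (chainN inv rest) := by
  induction rest generalizing b with
  | nil =>
    have := chainN_le inv ([] : List String)
    simp only [List.foldl_nil]
    simp [chainN, chainGo, bSuffixLens]
    omega
  | cons n rest ih =>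
    rw [List.foldl_cons, ih (min b (tierIndex inv n)) (by have := tierIndex_le inv n; omega),
        chainN_cons]
    omega

lemma aLoop_tiers (inv : String) (rest : List String) :
    aLoop inv
      [ ("1st Prize", 200000, .inr rest),
        ("2nd Prize", 40000, .inr (rest.map (fun num => PySem.Str.slice num (some (-7)) none))),
        ("3rd Prize", 10000, .inr (rest.map (fun num => PySem.Str.slice num (some (-6)) none))),
        ("4th Prize", 4000, .inr (rest.map (fun num => PySem.Str.slice num (some (-5)) none))),
        ("5th Prize", 1000, .inr (rest.map (fun num => PySem.Str.slice num (some (-4)) none))),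
        ("6th Prize", 200, .inr (rest.map (fun num => PySem.Str.slice num (some (-3)) none))) ] =
    (if chainN inv rest == 6 then (none, 0)
     else match bTiers[chainN inv rest]? with
       | some (name, value) => (some name, value)
       | none => (none, 0)) := by
  simp only [aLoop, chainN, chainGo, bSuffixLens, tailOf, List.any_map, Function.comp_def]
  split_ifs <;> first | rfl | simp_all

theorem check_prizes_eq (invoice_number : String) (prize_numbers : List String)
    (h : 2 ≤ prize_numbers.length) :
    check_prizes invoice_number prize_numbers = check_prizes_alt invoice_number prize_numbers := by
  match prize_numbers, h with
  | special :: grand :: rest, _ =>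
    have hfold : rest.foldl (fun b num => min b (tierIndex invoice_number num)) 6
        = chainN invoice_number rest := by
      rw [fold_min invoice_number rest 6 (le_refl 6)]
      have := chainN_le invoice_number rest
      omega
    simp only [check_prizes, check_prizes_alt, hfold]
    by_cases h1 : (invoice_number == special) = true
    · simp only [aLoop, h1, if_true]
    · by_cases h2 : (invoice_number == grand) = true
      · simp only [aLoop, h1, h2, if_true]
      · conv_lhs => rw [aLoop, aLoop]
        simp only [h1, h2]
        rw [aLoop_tiers]

-- ===== VERDICT (by name: the statement is the Claim_ definition above) =====
theorem check_prizes_spec : Claim_equal_check_prizes := by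
  intro inv pns _ hpre
  exact check_prizes_eq inv pns hpre
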